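-- pv_equiv track=rewrite | github.com/iamsyedomair/advent-of-code | 2023/day1.py | calculate_word_values
-- ===== SOURCE A (Python) =====
-- def calculate_word_values(line):
--     word_values = [
--         (index % 9) + 1
--         for start_index in range(len(line))
--         for index, word in enumerate("one two three four five six seven eight nine 1 2 3 4 5 6 7 8 9".split())
--         if line[start_index:start_index + len(word)] == word
--     ]
--     return word_values
-- ===== SOURCE B (Python) =====
-- def calculate_word_values(line):
--     words = "one two three four five six seven eight nine 1 2 3 4 5 6 7 8 9".split()
--     hits = []
--     for index, word in enumerate(words):
--         value = index % 9 + 1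
--         start = 0
--         while True:
--             pos = line.find(word, start)
--             if pos == -1:
--                 break
--             hits.append((pos, value))
--             start = pos + 1
--     hits.sort(key=lambda h: h[0])
--     return [value for _, value in hits]
-- ===== Notes on version B (the rewrite author's own statement) =====
-- stated objective: faster
-- what changed: A scans every position and tests all 18 words at each via Python-level slicing; B scans word-by-word with C-implemented str.find (advancing the cursor by 1 to catch overlapping matches), collects (position, value) hits and sorts them by position.
import Mathlib
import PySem

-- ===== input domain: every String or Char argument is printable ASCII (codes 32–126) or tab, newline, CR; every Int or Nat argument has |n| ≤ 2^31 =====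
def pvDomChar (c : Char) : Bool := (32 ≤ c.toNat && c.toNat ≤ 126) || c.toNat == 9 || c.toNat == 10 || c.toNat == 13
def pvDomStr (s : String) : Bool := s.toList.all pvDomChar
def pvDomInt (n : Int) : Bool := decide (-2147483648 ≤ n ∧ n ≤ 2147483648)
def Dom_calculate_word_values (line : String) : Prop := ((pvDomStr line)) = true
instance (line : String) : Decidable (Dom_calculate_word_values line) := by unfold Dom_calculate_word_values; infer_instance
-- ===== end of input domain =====

-- B replaces A's position-outer/word-inner scan with a word-outer str.find pass whose (position, value) hits are sorted by position (measured constant-factor speedup: C-level find vs per-position Python slicing).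

-- ===== PORT A =====
def calculate_word_values (line : String) : List Int :=
  (PySem.List.pyRange 0 (PySem.Str.len line) 1).flatMap (fun start_index =>
    ((PySem.List.enumerate (PySem.Str.split₀ "one two three four five six seven eight nine 1 2 3 4 5 6 7 8 9") 0).filter
        (fun iw => PySem.Str.slice line (some start_index) (some (start_index + PySem.Str.len iw.2)) == iw.2)).map
      (fun iw => PySem.Int.mod iw.1 9 + 1))

-- ===== PORT B =====
-- termination fact for the repeated-find loop, cited by pvFindAll's decreasing_by
theorem pvFindFrom_bounds (cs w : List Char) (start : Nat)
    (h : PySem.Chars.findFrom cs w (start : Int) none ≠ -1) :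
    (start : Int) ≤ PySem.Chars.findFrom cs w (start : Int) none ∧ start ≤ cs.length := by
  by_cases hs : start ≤ cs.length
  · exact ⟨(PySem.Chars.findFrom_natCast_spec cs w start hs h).1, hs⟩
  · exfalso
    apply h
    simp only [PySem.Chars.findFrom]
    rw [if_neg (show ¬((start : Int) < 0) by omega)]
    rw [if_pos (show ((cs.length : Int) < (start : Int)) by omega)]

-- the while-True find loop of Source B: emit (pos, value) and restart the search at pos+1
def pvFindAll (cs w : List Char) (v : Int) (start : Nat) : List (Int × Int) :=
  let pos := PySem.Chars.findFrom cs w (start : Int) none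
  if h : pos = -1 then []
  else (pos, v) :: pvFindAll cs w v (pos.toNat + 1)
termination_by cs.length + 1 - start
decreasing_by
  have := pvFindFrom_bounds cs w start h
  omega

def calculate_word_values_alt (line : String) : List Int :=
  let hits := (PySem.List.enumerate (PySem.Str.split₀ "one two three four five six seven eight nine 1 2 3 4 5 6 7 8 9") 0).foldl
    (fun acc iw => acc ++ pvFindAll line.toList iw.2.toList (PySem.Int.mod iw.1 9 + 1) 0) []
  (PySem.List.sorted hits (fun h => h.1)).map (fun h => h.2)

-- ===== PRECONDITION & SPEC =====
def Spec_calculate_word_values (line : String) (out : List Int) : Prop := out = calculate_word_values_alt line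
instance (line : String) (out : List Int) : Decidable (Spec_calculate_word_values line out) := by unfold Spec_calculate_word_values; infer_instance

-- ===== CLAIM (what is proved, stated in full; the proofs are below) =====
def Claim_equal_calculate_word_values : Prop := ∀ (line : String), Dom_calculate_word_values line → Spec_calculate_word_values line (calculate_word_values line)

-- ===== LEMMAS AND PROOFS =====

-- the 18 (word, value) pairs, as character lists
def pvWORDS : List (List Char × Int) :=
  [(['o','n','e'],1),(['t','w','o'],2),(['t','h','r','e','e'],3),(['f','o','u','r'],4),
   (['f','i','v','e'],5),(['s','i','x'],6),(['s','e','v','e','n'],7),(['e','i','g','h','t'],8),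
   (['n','i','n','e'],9),(['1'],1),(['2'],2),(['3'],3),(['4'],4),(['5'],5),(['6'],6),(['7'],7),(['8'],8),(['9'],9)]

theorem pvWORDS_eq :
    (PySem.List.enumerate (PySem.Str.split₀ "one two three four five six seven eight nine 1 2 3 4 5 6 7 8 9") 0).map
      (fun iw => (iw.2.toList, PySem.Int.mod iw.1 9 + 1)) = pvWORDS := by decide

theorem pv_noprefix : ∀ a ∈ pvWORDS, ∀ b ∈ pvWORDS, a.1 <+: b.1 → a.1 = b.1 := by decide

theorem pv_fst_ne : pvWORDS.Pairwise (fun a b => a.1 ≠ b.1) := by decide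

theorem pv_nonnil : ∀ wv ∈ pvWORDS, wv.1 ≠ [] := by decide

theorem pv_unique {t : List Char} {a b : List Char × Int} (ha : a ∈ pvWORDS) (hb : b ∈ pvWORDS)
    (hat : a.1 <+: t) (hbt : b.1 <+: t) : a.1 = b.1 := by
  rcases List.prefix_or_prefix_of_prefix hat hbt with h | h
  · exact pv_noprefix a ha b hb h
  · exact (pv_noprefix b hb a ha h).symm

-- A's pair list: positions in increasing order, the (at most one) matching word at each
def pvApairs (cs : List Char) : List (Int × Int) :=
  (List.range cs.length).flatMap (fun p =>
    (pvWORDS.filter (fun wv => decide (wv.1 <+: cs.drop p))).map (fun wv => ((p : Int), wv.2)))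

-- B's unsorted hit list
def pvHits (cs : List Char) : List (Int × Int) :=
  pvWORDS.flatMap (fun wv => pvFindAll cs wv.1 wv.2 0)

theorem pv_no_match_of_findFrom_neg (cs w : List Char) (start : Nat) (hw : w ≠ [])
    (hneg : PySem.Chars.findFrom cs w (start : Int) none = -1) :
    ∀ p : Nat, start ≤ p → ¬ (w <+: cs.drop p) := by
  intro p hsp hpref
  by_cases hs : start ≤ cs.length
  · have hnin := (PySem.Chars.findFrom_natCast_eq_neg_one_iff cs w start hs).1 hneg
    apply hnin
    have : cs.drop p = List.drop (p - start) (cs.drop start) := by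
      rw [List.drop_drop]
      congr 1
      omega
    rw [this] at hpref
    exact hpref.isInfix.trans (List.drop_suffix _ _).isInfix
  · have hne : cs.drop p = [] := List.drop_eq_nil_iff.2 (by omega)
    rw [hne] at hpref
    exact hw (List.prefix_nil.1 hpref)

theorem pvFindAll_eq (cs w : List Char) (v : Int) (hw : w ≠ []) : ∀ (start : Nat),
    pvFindAll cs w v start =
      ((List.range' start (cs.length - start)).filter (fun p => decide (w <+: cs.drop p))).map
        (fun (p : Nat) => ((p : Int), v)) := by
  suffices H : ∀ (m start : Nat), cs.length + 1 - start ≤ m → pvFindAll cs w v start =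
      ((List.range' start (cs.length - start)).filter (fun p => decide (w <+: cs.drop p))).map
        (fun (p : Nat) => ((p : Int), v)) from
    fun start => H (cs.length + 1 - start) start le_rfl
  intro m
  induction m with
  | zero =>
    intro start hle
    have hs : cs.length < start := by omega
    have hneg : PySem.Chars.findFrom cs w (start : Int) none = -1 := by
      by_contra hne
      have := pvFindFrom_bounds cs w start hne
      omega
    rw [pvFindAll]
    simp only [hneg, dite_true]
    have : cs.length - start = 0 := by omega
    simp [this]
  | succ m ih =>
    intro start hle
    rw [pvFindAll]
    by_cases hneg : PySem.Chars.findFrom cs w (start : Int) none = -1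
    · simp only [hneg, dite_true]
      symm
      rw [List.map_eq_nil_iff, List.filter_eq_nil_iff]
      intro p hp
      simp only [decide_eq_true_eq]
      exact pv_no_match_of_findFrom_neg cs w start hw hneg p (List.mem_range'_1.1 hp).1
    · simp only [hneg, dite_false]
      have hb := pvFindFrom_bounds cs w start hneg
      obtain ⟨hsp, hsl⟩ := hb
      set pos := PySem.Chars.findFrom cs w (start : Int) none with hposdef
      obtain ⟨_, hpref, hmin⟩ := PySem.Chars.findFrom_natCast_spec cs w start hsl hneg
      set q := pos.toNat with hq
      have hposq : pos = (q : Int) := by omega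
      have hsq : start ≤ q := by omega
      have hqn : q < cs.length := by
        have hne : cs.drop q ≠ [] := by
          intro hnil
          rw [hnil] at hpref
          exact hw (List.prefix_nil.1 hpref)
        have := List.drop_eq_nil_iff.not.1 (by exact fun h => hne h)
        omega
      have hrange : List.range' start (cs.length - start) =
          List.range' start (q - start) ++ q :: List.range' (q + 1) (cs.length - (q + 1)) := by
        have h1 : List.range' start (q - start) ++ List.range' (start + 1 * (q - start)) ((cs.length - start) - (q - start)) =
            List.range' start ((q - start) + ((cs.length - start) - (q - start))) := List.range'_append
        rw [show (q - start) + ((cs.length - start) - (q - start)) = cs.length - start by omega] at h1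
        rw [← h1]
        congr 1
        rw [show start + 1 * (q - start) = q by omega,
          show (cs.length - start) - (q - start) = (cs.length - (q + 1)) + 1 by omega,
          List.range'_succ]
      rw [hrange]
      rw [List.filter_append, List.map_append]
      have hfilt1 : (List.range' start (q - start)).filter (fun p => decide (w <+: cs.drop p)) = [] := by
        rw [List.filter_eq_nil_iff]
        intro p hp
        simp only [decide_eq_true_eq]
        have hpb := List.mem_range'_1.1 hp
        intro hc
        have : p < q := by omega
        exact hmin p hpb.1 this hc
      rw [hfilt1, List.map_nil, List.nil_append, List.filter_cons,
        if_pos (by simpa using hpref)]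
      rw [List.map_cons, ih (q + 1) (by omega), hposq]

theorem pvFindAll_zero (cs w : List Char) (v : Int) (hw : w ≠ []) :
    pvFindAll cs w v 0 =
      ((List.range cs.length).filter (fun p => decide (w <+: cs.drop p))).map (fun (p : Nat) => ((p : Int), v)) := by
  rw [pvFindAll_eq cs w v hw 0, List.range_eq_range', Nat.sub_zero]

theorem mem_pvFindAll {cs : List Char} {wv : List Char × Int} (hwv : wv ∈ pvWORDS) {x : Int × Int} :
    x ∈ pvFindAll cs wv.1 wv.2 0 ↔ ∃ p : Nat, p < cs.length ∧ wv.1 <+: cs.drop p ∧ x = ((p : Int), wv.2) := by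
  rw [pvFindAll_zero cs wv.1 wv.2 (pv_nonnil wv hwv)]
  simp only [List.mem_map, List.mem_filter, List.mem_range, decide_eq_true_eq]
  constructor
  · rintro ⟨p, ⟨h1, h2⟩, rfl⟩
    exact ⟨p, h1, h2, rfl⟩
  · rintro ⟨p, h1, h2, rfl⟩
    exact ⟨p, ⟨h1, h2⟩, rfl⟩

theorem mem_pvHits {cs : List Char} {x : Int × Int} :
    x ∈ pvHits cs ↔ ∃ wv ∈ pvWORDS, ∃ p : Nat, p < cs.length ∧ wv.1 <+: cs.drop p ∧ x = ((p : Int), wv.2) := by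
  unfold pvHits
  rw [List.mem_flatMap]
  constructor
  · rintro ⟨wv, hwv, hx⟩
    exact ⟨wv, hwv, (mem_pvFindAll hwv).1 hx⟩
  · rintro ⟨wv, hwv, hp⟩
    exact ⟨wv, hwv, (mem_pvFindAll hwv).2 hp⟩

theorem mem_pvApairs {cs : List Char} {x : Int × Int} :
    x ∈ pvApairs cs ↔ ∃ wv ∈ pvWORDS, ∃ p : Nat, p < cs.length ∧ wv.1 <+: cs.drop p ∧ x = ((p : Int), wv.2) := by
  unfold pvApairs
  simp only [List.mem_flatMap, List.mem_map, List.mem_filter, List.mem_range, decide_eq_true_eq]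
  constructor
  · rintro ⟨p, hp, wv, ⟨hwv, hpref⟩, rfl⟩
    exact ⟨wv, hwv, p, hp, hpref, rfl⟩
  · rintro ⟨wv, hwv, p, hp, hpref, rfl⟩
    exact ⟨p, hp, wv, ⟨hwv, hpref⟩, rfl⟩

theorem pv_filter_pairwise_false (cs : List Char) (p : Nat) :
    (pvWORDS.filter (fun wv => decide (wv.1 <+: cs.drop p))).Pairwise (fun _ _ => False) := by
  have hpw := pv_fst_ne.sublist (List.filter_sublist (p := fun wv => decide (wv.1 <+: cs.drop p)) (l := pvWORDS))
  cases hfl : pvWORDS.filter (fun wv => decide (wv.1 <+: cs.drop p)) with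
  | nil => exact List.Pairwise.nil
  | cons a t =>
    cases t with
    | nil => simp
    | cons b t' =>
      exfalso
      have ha : a ∈ pvWORDS.filter (fun wv => decide (wv.1 <+: cs.drop p)) := by rw [hfl]; simp
      have hb : b ∈ pvWORDS.filter (fun wv => decide (wv.1 <+: cs.drop p)) := by rw [hfl]; simp
      have hane : a.1 ≠ b.1 := by
        rw [hfl] at hpw
        exact (List.pairwise_cons.1 hpw).1 b (by simp)
      exact hane (pv_unique (List.mem_of_mem_filter ha) (List.mem_of_mem_filter hb)
        (of_decide_eq_true ((List.mem_filter.1 ha).2)) (of_decide_eq_true ((List.mem_filter.1 hb).2)))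

theorem pvApairs_pairwise (cs : List Char) : (pvApairs cs).Pairwise (fun a b => a.1 < b.1) := by
  unfold pvApairs
  rw [List.pairwise_flatMap]
  constructor
  · intro p _
    rw [List.pairwise_map]
    exact (pv_filter_pairwise_false cs p).imp (fun h => h.elim)
  · refine List.pairwise_lt_range.imp_of_mem ?_
    rintro p q _ _ hpq x hx y hy
    rcases List.mem_map.1 hx with ⟨_, _, rfl⟩
    rcases List.mem_map.1 hy with ⟨_, _, rfl⟩
    simpa using hpq

theorem pvApairs_nodup (cs : List Char) : (pvApairs cs).Nodup :=
  (pvApairs_pairwise cs).imp (fun h heq => by rw [heq] at h; exact lt_irrefl _ h)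

theorem pvHits_nodup (cs : List Char) : (pvHits cs).Nodup := by
  unfold pvHits
  rw [List.Nodup, List.pairwise_flatMap]
  constructor
  · intro wv hwv
    rw [pvFindAll_zero cs wv.1 wv.2 (pv_nonnil wv hwv), List.pairwise_map]
    refine ((List.pairwise_lt_range).sublist (List.filter_sublist)).imp ?_
    intro a b hab heq
    have : (a : Int) = b := congrArg Prod.fst heq
    omega
  · refine pv_fst_ne.imp_of_mem ?_
    rintro a b ha hb hne x hx y hy heq
    rw [pvFindAll_zero cs a.1 a.2 (pv_nonnil a ha)] at hx
    rw [pvFindAll_zero cs b.1 b.2 (pv_nonnil b hb)] at hy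
    rcases List.mem_map.1 hx with ⟨p, hp, rfl⟩
    rcases List.mem_map.1 hy with ⟨q, hq, rfl⟩
    have hpq : p = q := by
      have : (p : Int) = q := congrArg Prod.fst heq
      omega
    subst hpq
    exact hne (pv_unique ha hb (of_decide_eq_true ((List.mem_filter.1 hp).2))
      (of_decide_eq_true ((List.mem_filter.1 hq).2)))

theorem pv_perm (cs : List Char) : (pvApairs cs).Perm (pvHits cs) := by
  rw [List.perm_ext_iff_of_nodup (pvApairs_nodup cs) (pvHits_nodup cs)]
  intro x
  rw [mem_pvApairs, mem_pvHits]

theorem pvA_eq (line : String) : calculate_word_values line = (pvApairs line.toList).map (fun h => h.2) := by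
  unfold calculate_word_values pvApairs
  rw [PySem.Str.len_eq, PySem.List.pyRange_zero_nat, List.flatMap_map, List.map_flatMap]
  congr 1
  funext p
  rw [← pvWORDS_eq, List.filter_map, List.map_map, List.map_map]
  congr 1
  apply List.filter_congr
  intro iw _
  simp only [Function.comp_apply]
  rw [Bool.eq_iff_iff, beq_iff_eq, decide_eq_true_eq]
  rw [← String.toList_inj, PySem.Str.toList_slice, PySem.Chars.slice_eq_listSlice]
  simp only [PySem.Str.len_eq]
  rw [PySem.List.slice_natCast_add]
  rw [List.prefix_iff_eq_take]
  exact eq_comm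

theorem pvB_eq (line : String) :
    calculate_word_values_alt line =
      (PySem.List.sorted (pvHits line.toList) (fun h => h.1)).map (fun h => h.2) := by
  unfold calculate_word_values_alt pvHits
  rw [PySem.List.foldl_append_eq_flatMap, List.nil_append, ← pvWORDS_eq, List.flatMap_map]

-- ===== VERDICT (by name: the statement is the Claim_ definition above) =====
theorem calculate_word_values_spec : Claim_equal_calculate_word_values := by
  intro line _
  unfold Spec_calculate_word_values
  rw [pvA_eq, pvB_eq,
    PySem.List.sorted_eq_of_perm_of_pairwise_lt (pvHits line.toList) (pvApairs line.toList)
      (fun h => h.1) (pv_perm line.toList) (pvApairs_pairwise line.toList)]
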